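-- pv_equiv track=rewrite | github.com/maximofraisinet/tree-solver | algorithms.py | dfs_generator
-- ===== SOURCE A (Python) =====
-- from typing import Generator, Dict, List, Tuple, Optional
--
-- def dfs_generator(
--     graph: Dict[str, List[str]],
--     start: str,
--     goal: str
-- ) -> Generator[Tuple[str, str, Optional[List[str]]], None, None]:
--     """
--     Depth-First Search implemented as a generator.
--
--     Yields tuples of (action, node, path_so_far) where:
--     - action: 'visit', 'visited', 'goal_found'
--     - node: the node being acted upon
--     - path_so_far: the path from start to this node
--     """
--     if start not in graph:
--         return
--
--     visited = set()
--
--     def dfs_recursive(node: str, path: List[str]):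
--         visited.add(node)
--         yield ('visit', node, path)
--
--         if node == goal:
--             yield ('goal_found', node, path)
--             return
--
--         neighbors = graph.get(node, [])
--         for neighbor in neighbors:
--             if neighbor not in visited:
--                 yield ('exploring', neighbor, path + [neighbor])
--                 yield from dfs_recursive(neighbor, path + [neighbor])
--
--         yield ('visited', node, path)
--
--     yield from dfs_recursive(start, [start])
-- ===== SOURCE B (Python) =====
-- def dfs_generator(graph, start, goal):
--     """Iterative DFS with an explicit stack of (node, path, neighbor-iterator) frames."""
--     if start not in graph:
--         return
--     visited = {start}
--     yield ('visit', start, [start])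
--     if start == goal:
--         yield ('goal_found', start, [start])
--         return
--     stack = [(start, [start], iter(graph.get(start, [])))]
--     while stack:
--         node, path, it = stack[-1]
--         pushed = False
--         for n in it:
--             if n in visited:
--                 continue
--             npath = path + [n]
--             yield ('exploring', n, npath)
--             visited.add(n)
--             yield ('visit', n, npath)
--             if n == goal:
--                 yield ('goal_found', n, npath)
--                 continue
--             stack.append((n, npath, iter(graph.get(n, []))))
--             pushed = True
--             break
--         if not pushed:
--             yield ('visited', node, path)
--             stack.pop()
-- ===== Notes on version B (the rewrite author's own statement) =====
-- stated objective: alternative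
-- what changed: A's recursive generator helper (implicit call stack, yield-from) is replaced by an iterative DFS over an explicit stack of (node, path, remaining-neighbors) frames that emits the identical event sequence.
import Mathlib
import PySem

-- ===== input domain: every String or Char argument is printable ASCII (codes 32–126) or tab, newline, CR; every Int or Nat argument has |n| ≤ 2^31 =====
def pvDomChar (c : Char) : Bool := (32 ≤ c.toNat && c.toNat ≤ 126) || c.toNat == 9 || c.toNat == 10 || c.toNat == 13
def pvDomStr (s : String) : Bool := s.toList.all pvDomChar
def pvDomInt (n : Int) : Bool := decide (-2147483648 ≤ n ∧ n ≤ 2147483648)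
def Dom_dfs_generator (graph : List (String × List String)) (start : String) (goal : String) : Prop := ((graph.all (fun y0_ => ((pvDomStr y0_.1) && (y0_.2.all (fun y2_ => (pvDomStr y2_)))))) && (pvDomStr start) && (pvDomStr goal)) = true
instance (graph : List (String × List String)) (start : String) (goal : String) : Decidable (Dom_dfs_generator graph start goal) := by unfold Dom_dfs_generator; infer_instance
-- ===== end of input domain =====

-- B replaces A's recursive generator by an explicit stack of (node, path, remaining-neighbors) frames
-- (alternative decomposition, same cost); equivalence of the full event sequences is proved below.

-- ===== PORT A =====
-- A's recursion is modelled with a fuel guard (fuel = #distinct nodes + 1, proven never exhausted).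
mutual
  -- the body of A's `dfs_recursive`
  def pvAvisit (g : List (String × List String)) (goal : String) :
      Nat → String → List String → PySem.Set String → (List (String × String × Option (List String)) × PySem.Set String)
    | 0, _, _, v => ([], v)
    | fuel + 1, node, path, v =>
      let v1 := PySem.Set.add v node
      if node = goal then
        ([("visit", node, some path), ("goal_found", node, some path)], v1)
      else
        let r := pvAloop g goal fuel ((PySem.Dict.mk g).getD node []) node path v1
        (("visit", node, some path) :: r.1 ++ [("visited", node, some path)], r.2)
  termination_by fuel _ _ _ => (fuel, 0)
  -- A's `for neighbor in neighbors` loop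
  def pvAloop (g : List (String × List String)) (goal : String) :
      Nat → List String → String → List String → PySem.Set String → (List (String × String × Option (List String)) × PySem.Set String)
    | _, [], _, _, v => ([], v)
    | fuel, n :: rest, node, path, v =>
      if PySem.Set.contains v n then pvAloop g goal fuel rest node path v
      else
        let r1 := pvAvisit g goal fuel n (path ++ [n]) v
        let r2 := pvAloop g goal fuel rest node path r1.2
        (("exploring", n, some (path ++ [n])) :: r1.1 ++ r2.1, r2.2)
  termination_by fuel ns _ _ _ => (fuel, ns.length + 1)
end
def dfs_generator (graph : List (String × List String)) (start : String) (goal : String) : List (String × String × Option (List String)) :=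
  if (PySem.Dict.mk graph).contains start then
    (pvAvisit graph goal ((PySem.Set.ofList (start :: graph.flatMap Prod.snd)).length + 1) start [start] PySem.Set.empty).1
  else []

-- ===== PORT B =====
-- B's while-loop over the explicit frame stack, with a fuel guard (proven never exhausted).
def pvBrun (g : List (String × List String)) (goal : String) :
    Nat → List (String × List String × List String) → PySem.Set String → List (String × String × Option (List String))
  | 0, _, _ => []
  | _ + 1, [], _ => []
  | fuel + 1, (node, path, ns) :: stack, v =>
    match ns with
    | [] => ("visited", node, some path) :: pvBrun g goal fuel stack v
    | n :: rest =>
      if PySem.Set.contains v n then pvBrun g goal fuel ((node, path, rest) :: stack) v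
      else
        let npath := path ++ [n]
        let v1 := PySem.Set.add v n
        if n = goal then
          ("exploring", n, some npath) :: ("visit", n, some npath) :: ("goal_found", n, some npath) ::
            pvBrun g goal fuel ((node, path, rest) :: stack) v1
        else
          ("exploring", n, some npath) :: ("visit", n, some npath) ::
            pvBrun g goal fuel ((n, npath, (PySem.Dict.mk g).getD n []) :: (node, path, rest) :: stack) v1

def pvFuelB (graph : List (String × List String)) (start : String) : Nat :=
  ((PySem.Set.ofList (start :: graph.flatMap Prod.snd)).length + 1) * ((graph.flatMap Prod.snd).length + 2)

def dfs_generator_alt (graph : List (String × List String)) (start : String) (goal : String) : List (String × String × Option (List String)) :=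
  if (PySem.Dict.mk graph).contains start then
    if start = goal then [("visit", start, some [start]), ("goal_found", start, some [start])]
    else
      ("visit", start, some [start]) ::
        pvBrun graph goal (pvFuelB graph start)
          [(start, [start], (PySem.Dict.mk graph).getD start [])]
          (PySem.Set.add PySem.Set.empty start)
  else []

-- ===== PRECONDITION & SPEC =====
def Spec_dfs_generator (graph : List (String × List String)) (start : String) (goal : String) (out : List (String × String × Option (List String))) : Prop := out = dfs_generator_alt graph start goal
instance (graph : List (String × List String)) (start : String) (goal : String) (out : List (String × String × Option (List String))) : Decidable (Spec_dfs_generator graph start goal out) := by unfold Spec_dfs_generator; infer_instance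

-- ===== CLAIM (what is proved, stated in full; the proofs are below) =====
def Claim_equal_dfs_generator : Prop := ∀ (graph : List (String × List String)) (start : String) (goal : String), Dom_dfs_generator graph start goal → Spec_dfs_generator graph start goal (dfs_generator graph start goal)

-- ===== LEMMAS AND PROOFS =====

-- proof-only helpers
def pvSumNS (s : List (String × List String × List String)) : Nat :=
  (s.map (fun f => f.2.2.length + 1)).sum

def pvMu (U : List String) (C : Nat) (s : List (String × List String × List String)) (v : List String) : Nat :=
  pvSumNS s + (U.length - v.length) * C

abbrev pvInvS (U : List String) (s : List (String × List String × List String)) : Prop :=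
  ∀ f ∈ s, ∀ n ∈ f.2.2, n ∈ U

-- "the visited set evolved legally": distinct, inside the universe, no shorter than before
abbrev pvVInv (U v v' : List String) : Prop := v'.Nodup ∧ v' ⊆ U ∧ v.length ≤ v'.length

lemma pvBrun_nil (g : List (String × List String)) (goal : String) (fb : Nat) (v : PySem.Set String) :
    pvBrun g goal fb [] v = [] := by cases fb <;> rfl

lemma pvGetD_cases (g : List (String × List String)) (k : String) :
    (PySem.Dict.mk g).getD k [] = [] ∨ ∃ p ∈ g, (PySem.Dict.mk g).getD k [] = p.2 := by
  induction g with
  | nil => left; rfl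
  | cons a t ih =>
    rw [PySem.Dict.getD_eq_get?_getD, PySem.Dict.get?_mk_cons]
    by_cases h : a.1 = k
    · right; exact ⟨a, by simp, by simp [h]⟩
    · rw [if_neg (by simp [h]), ← PySem.Dict.getD_eq_get?_getD]
      rcases ih with h2 | ⟨p, hp, h2⟩
      · left; exact h2
      · right; exact ⟨p, by simp [hp], h2⟩

lemma pvMem_len_le (g : List (String × List String)) (p : String × List String) (hp : p ∈ g) :
    p.2.length ≤ (g.flatMap Prod.snd).length := by
  induction g with
  | nil => simp at hp
  | cons a t ih =>
    simp only [List.flatMap_cons, List.length_append]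
    rcases List.mem_cons.1 hp with h | h
    · subst h; omega
    · have := ih h; omega

lemma pvGetD_mem_flat (g : List (String × List String)) (k : String) :
    ∀ x ∈ (PySem.Dict.mk g).getD k [], x ∈ g.flatMap Prod.snd := by
  intro x hx
  rcases pvGetD_cases g k with h | ⟨p, hp, h⟩
  · rw [h] at hx; simp at hx
  · rw [h] at hx; exact List.mem_flatMap.2 ⟨p, hp, hx⟩

lemma pvGetD_len_le (g : List (String × List String)) (k : String) :
    ((PySem.Dict.mk g).getD k []).length ≤ (g.flatMap Prod.snd).length := by
  rcases pvGetD_cases g k with h | ⟨p, hp, h⟩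
  · simp [h]
  · rw [h]; exact pvMem_len_le g p hp

lemma pvLen_le (U v : List String) (_hU : U.Nodup) (hv : v.Nodup)
    (hsub : v ⊆ U) : v.length ≤ U.length := by
  have h1 : v.toFinset.card = v.length := List.toFinset_card_of_nodup hv
  have h2 : v.toFinset ⊆ U.toFinset := by
    intro x hx; simp only [List.mem_toFinset] at *; exact hsub hx
  have h3 := Finset.card_le_card h2
  have h4 : U.toFinset.card ≤ U.length := U.toFinset_card_le
  omega

lemma pvLen_lt (U v : List String) (n : String) (hU : U.Nodup) (hv : v.Nodup)
    (hsub : v ⊆ U) (hn : n ∈ U) (hnv : n ∉ v) : v.length < U.length := by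
  have h1 : (v ++ [n]).Nodup := by
    simp only [List.nodup_append, hv, List.nodup_cons, List.not_mem_nil, not_false_iff, List.nodup_nil, true_and]
    intro a ha b hb
    simp only [List.mem_singleton] at hb
    subst hb; intro h; exact hnv (h ▸ ha)
  have h2 : (v ++ [n]) ⊆ U := by
    intro x hx
    rcases List.mem_append.1 hx with h | h
    · exact hsub h
    · simp at h; exact h ▸ hn
  have := pvLen_le U (v ++ [n]) hU h1 h2
  simp at this; omega

lemma pvVInv_add (U v : List String) (n : String) (hv : v.Nodup) (hsub : v ⊆ U) (hn : n ∈ U) :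
    (PySem.Set.add v n).Nodup ∧ PySem.Set.add v n ⊆ U ∧ v.length ≤ (PySem.Set.add v n).length := by
  refine ⟨PySem.Set.nodup_add v n hv, ?_, ?_⟩
  · intro x hx
    rcases (PySem.Set.mem_add v n x).1 hx with h | h
    · exact hsub h
    · exact h ▸ hn
  · rw [PySem.Set.add_eq_ite]; split <;> simp

lemma pvAloop_inv (g : List (String × List String)) (goal : String) (U : List String)
    (_hval : ∀ x ∈ g.flatMap Prod.snd, x ∈ U) (fuel : Nat)
    (H : ∀ node path v, v.Nodup → v ⊆ U → node ∈ U →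
      pvVInv U v (pvAvisit g goal fuel node path v).2) :
    ∀ ns node path v, v.Nodup → v ⊆ U → (∀ n ∈ ns, n ∈ U) →
      pvVInv U v (pvAloop g goal fuel ns node path v).2 := by
  intro ns
  induction ns with
  | nil =>
    intro node path v hv hsub _
    rw [pvAloop]; exact ⟨hv, hsub, le_refl _⟩
  | cons n rest ih =>
    intro node path v hv hsub hns
    rw [pvAloop]
    by_cases hn : n ∈ v
    · rw [if_pos ((PySem.Set.contains_iff v n).2 hn)]
      exact ih node path v hv hsub (fun x hx => hns x (by simp [hx]))
    · rw [if_neg (fun hc => hn ((PySem.Set.contains_iff v n).1 hc))]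
      have h1 := H n (path ++ [n]) v hv hsub (hns n (by simp))
      have h2 := ih node path (pvAvisit g goal fuel n (path ++ [n]) v).2 h1.1 h1.2.1
        (fun x hx => hns x (by simp [hx]))
      exact ⟨h2.1, h2.2.1, le_trans h1.2.2 h2.2.2⟩

lemma pvAvisit_inv (g : List (String × List String)) (goal : String) (U : List String)
    (hval : ∀ x ∈ g.flatMap Prod.snd, x ∈ U) :
    ∀ fuel node path v, v.Nodup → v ⊆ U → node ∈ U →
      pvVInv U v (pvAvisit g goal fuel node path v).2 := by
  intro fuel
  induction fuel with
  | zero =>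
    intro node path v hv hsub _
    rw [pvAvisit]; exact ⟨hv, hsub, le_refl _⟩
  | succ fuel ih =>
    intro node path v hv hsub hnode
    rw [pvAvisit]
    have hadd := pvVInv_add U v node hv hsub hnode
    by_cases hg : node = goal
    · rw [if_pos hg]; exact ⟨hadd.1, hadd.2.1, hadd.2.2⟩
    · rw [if_neg hg]
      have hns : ∀ x ∈ (PySem.Dict.mk g).getD node [], x ∈ U :=
        fun x hx => hval x (pvGetD_mem_flat g node x hx)
      have h2 := pvAloop_inv g goal U hval fuel ih ((PySem.Dict.mk g).getD node []) node path
        (PySem.Set.add v node) hadd.1 hadd.2.1 hns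
      exact ⟨h2.1, h2.2.1, le_trans hadd.2.2 h2.2.2⟩

-- B's machine is fuel-invariant once the fuel exceeds the measure pvMu
lemma pvBfuel (g : List (String × List String)) (goal : String) (U : List String) (C : Nat)
    (hU : U.Nodup) (hval : ∀ x ∈ g.flatMap Prod.snd, x ∈ U)
    (hC : (g.flatMap Prod.snd).length + 2 ≤ C) :
    ∀ m s v fb1 fb2, pvMu U C s v ≤ m → pvInvS U s → v.Nodup → v ⊆ U →
      m < fb1 → m < fb2 → pvBrun g goal fb1 s v = pvBrun g goal fb2 s v := by
  intro m
  induction m with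
  | zero =>
    intro s v fb1 fb2 hm _ _ _ _ _
    cases s with
    | nil => rw [pvBrun_nil, pvBrun_nil]
    | cons f stack => simp [pvMu, pvSumNS] at hm
  | succ m ih =>
    intro s v fb1 fb2 hm hstack hv hsub hfb1 hfb2
    cases s with
    | nil => rw [pvBrun_nil, pvBrun_nil]
    | cons f stack =>
      obtain ⟨node, path, ns⟩ := f
      obtain ⟨a, rfl⟩ : ∃ a, fb1 = a + 1 := ⟨fb1 - 1, by omega⟩
      obtain ⟨b, rfl⟩ : ∃ b, fb2 = b + 1 := ⟨fb2 - 1, by omega⟩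
      cases ns with
      | nil =>
        rw [pvBrun, pvBrun]
        congr 1
        refine ih stack v a b ?_ (fun f hf => hstack f (by simp [hf])) hv hsub (by omega) (by omega)
        simp only [pvMu, pvSumNS, List.map_cons, List.sum_cons] at hm ⊢
        omega
      | cons n rest =>
        rw [pvBrun, pvBrun]
        by_cases hn : n ∈ v
        · simp only [if_pos ((PySem.Set.contains_iff v n).2 hn)]
          refine ih ((node, path, rest) :: stack) v a b ?_ ?_ hv hsub (by omega) (by omega)
          · simp only [pvMu, pvSumNS, List.map_cons, List.sum_cons, List.length_cons] at hm ⊢; omega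
          · intro f hf
            rcases List.mem_cons.1 hf with h | h
            · subst h; intro x hx; exact hstack (node, path, n :: rest) (by simp) x (by simp [hx])
            · exact hstack f (by simp [h])
        · simp only [if_neg (fun hc => hn ((PySem.Set.contains_iff v n).1 hc))]
          have hnU : n ∈ U := hstack (node, path, n :: rest) (by simp) n (by simp)
          have hlt : v.length < U.length := pvLen_lt U v n hU hv hsub hnU hn
          have hv1 := pvVInv_add U v n hv hsub hnU
          have hlen1 : (PySem.Set.add v n).length = v.length + 1 := by
            rw [PySem.Set.add_of_not_mem hn]; simp
          have hmul : (U.length - v.length) * C = (U.length - (v.length + 1)) * C + C := by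
            have h : U.length - v.length = (U.length - (v.length + 1)) + 1 := by omega
            rw [h, Nat.succ_mul]
          have hrest : ∀ f ∈ ((node, path, rest) :: stack), ∀ x ∈ f.2.2, x ∈ U := by
            intro f hf
            rcases List.mem_cons.1 hf with h | h
            · subst h; intro x hx; exact hstack (node, path, n :: rest) (by simp) x (by simp [hx])
            · exact hstack f (by simp [h])
          have hmm : (n :: rest).length = rest.length + 1 := rfl
          by_cases hg : n = goal
          · simp only [if_pos hg]
            congr 3
            refine ih ((node, path, rest) :: stack) (PySem.Set.add v n) a b ?_ hrest hv1.1 hv1.2.1 (by omega) (by omega)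
            simp only [pvMu, pvSumNS, List.map_cons, List.sum_cons, hlen1] at hm ⊢
            omega
          · simp only [if_neg hg]
            congr 2
            refine ih ((n, path ++ [n], (PySem.Dict.mk g).getD n []) :: (node, path, rest) :: stack)
              (PySem.Set.add v n) a b ?_ ?_ hv1.1 hv1.2.1 (by omega) (by omega)
            · have hlenD := pvGetD_len_le g n
              simp only [pvMu, pvSumNS, List.map_cons, List.sum_cons, hlen1] at hm ⊢
              omega
            · intro f hf
              rcases List.mem_cons.1 hf with h | h
              · subst h; intro x hx; exact hval x (pvGetD_mem_flat g n x hx)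
              · exact hrest f h

-- MAIN: running B's machine on a topmost frame produces exactly A's loop events,
-- then the frame's 'visited' event, then the run of the remaining stack.
lemma pvMain (g : List (String × List String)) (goal : String) (U : List String) (C : Nat)
    (hU : U.Nodup) (hval : ∀ x ∈ g.flatMap Prod.snd, x ∈ U)
    (hC : (g.flatMap Prod.snd).length + 2 ≤ C) :
    ∀ m fa node path ns v stack fb,
      v.Nodup → v ⊆ U → (∀ n ∈ ns, n ∈ U) → pvInvS U stack →
      (U.length - v.length) * C + ns.length ≤ m →
      U.length - v.length + 1 ≤ fa →
      pvMu U C ((node, path, ns) :: stack) v < fb →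
      pvBrun g goal fb ((node, path, ns) :: stack) v
        = (pvAloop g goal fa ns node path v).1
          ++ ("visited", node, some path)
            :: pvBrun g goal (pvMu U C stack (pvAloop g goal fa ns node path v).2 + 1) stack
                (pvAloop g goal fa ns node path v).2 := by
  intro m
  induction m using Nat.strong_induction_on with
  | _ m ih =>
  intro fa node path ns v stack fb hv hsub hns hstack hm hfa hfb
  obtain ⟨a, rfl⟩ : ∃ a, fb = a + 1 := ⟨fb - 1, by omega⟩
  cases ns with
  | nil =>
    rw [pvBrun, pvAloop]
    simp only [List.nil_append]
    congr 1
    refine pvBfuel g goal U C hU hval hC (pvMu U C stack v) stack v a (pvMu U C stack v + 1)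
      le_rfl (fun f hf => hstack f hf) hv hsub ?_ (by omega)
    simp only [pvMu, pvSumNS, List.map_cons, List.sum_cons, List.length_nil] at hfb ⊢
    omega
  | cons n rest =>
    have hmm : (n :: rest).length = rest.length + 1 := rfl
    rw [pvBrun, pvAloop]
    by_cases hn : n ∈ v
    · simp only [if_pos ((PySem.Set.contains_iff v n).2 hn)]
      refine ih ((U.length - v.length) * C + rest.length) (by omega) fa node path rest v stack a
        hv hsub (fun x hx => hns x (by simp [hx])) hstack le_rfl hfa ?_
      simp only [pvMu, pvSumNS, List.map_cons, List.sum_cons, hmm] at hfb ⊢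
      omega
    · simp only [if_neg (fun hc => hn ((PySem.Set.contains_iff v n).1 hc))]
      have hnU : n ∈ U := hns n (by simp)
      have hlt : v.length < U.length := pvLen_lt U v n hU hv hsub hnU hn
      have hv1 := pvVInv_add U v n hv hsub hnU
      have hlen1 : (PySem.Set.add v n).length = v.length + 1 := by
        rw [PySem.Set.add_of_not_mem hn]; simp
      have hmul : (U.length - v.length) * C = (U.length - (v.length + 1)) * C + C := by
        have h : U.length - v.length = (U.length - (v.length + 1)) + 1 := by omega
        rw [h, Nat.succ_mul]
      obtain ⟨fa', rfl⟩ : ∃ fa', fa = fa' + 1 := ⟨fa - 1, by omega⟩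
      rw [pvAvisit]
      by_cases hg : n = goal
      · simp only [if_pos hg]
        have hrec := ih ((U.length - (v.length + 1)) * C + rest.length) (by omega)
          (fa' + 1) node path rest (PySem.Set.add v n) stack a
          hv1.1 hv1.2.1 (fun x hx => hns x (by simp [hx])) hstack (by rw [hlen1]) (by omega) ?_
        · rw [hrec]; simp
        · simp only [pvMu, pvSumNS, List.map_cons, List.sum_cons, hmm, hlen1] at hfb ⊢
          omega
      · simp only [if_neg hg]
        have hnsD : ∀ x ∈ (PySem.Dict.mk g).getD n [], x ∈ U :=
          fun x hx => hval x (pvGetD_mem_flat g n x hx)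
        have hlenD := pvGetD_len_le g n
        have hrec1 := ih ((U.length - (v.length + 1)) * C + ((PySem.Dict.mk g).getD n []).length)
          (by omega) fa' n (path ++ [n]) ((PySem.Dict.mk g).getD n []) (PySem.Set.add v n)
          ((node, path, rest) :: stack) a
          hv1.1 hv1.2.1 hnsD ?_ (by rw [hlen1]) (by rw [hlen1]; omega) ?_
        · set q := pvAloop g goal fa' ((PySem.Dict.mk g).getD n []) n (path ++ [n]) (PySem.Set.add v n) with hq
          have hqinv := pvAloop_inv g goal U hval fa' (pvAvisit_inv g goal U hval fa')
            ((PySem.Dict.mk g).getD n []) n (path ++ [n]) (PySem.Set.add v n)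
            hv1.1 hv1.2.1 hnsD
          have hrec2 := ih ((U.length - q.2.length) * C + rest.length) ?_
            (fa' + 1) node path rest q.2 stack (pvMu U C ((node, path, rest) :: stack) q.2 + 1)
            hqinv.1 hqinv.2.1 (fun x hx => hns x (by simp [hx])) hstack le_rfl ?_ (by omega)
          · rw [hrec1, hrec2]
            simp
          · have : v.length + 1 ≤ q.2.length := by rw [← hlen1]; exact hqinv.2.2
            have hq2 : q.2.length ≤ U.length := pvLen_le U q.2 hU hqinv.1 hqinv.2.1
            have : (U.length - q.2.length) * C ≤ (U.length - (v.length + 1)) * C :=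
              Nat.mul_le_mul_right C (by omega)
            omega
          · have : v.length + 1 ≤ q.2.length := by rw [← hlen1]; exact hqinv.2.2
            have : (U.length - q.2.length) ≤ (U.length - (v.length + 1)) := by omega
            have := Nat.mul_le_mul_right C this
            omega
        · intro f hf
          rcases List.mem_cons.1 hf with h | h
          · subst h; intro x hx; exact hns x (by simp [hx])
          · exact hstack f h
        · simp only [pvMu, pvSumNS, List.map_cons, List.sum_cons, hmm, hlen1] at hfb ⊢
          omega


-- ===== VERDICT (by name: the statement is the Claim_ definition above) =====
theorem dfs_generator_spec : Claim_equal_dfs_generator := by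
  intro graph start goal _
  unfold Spec_dfs_generator dfs_generator dfs_generator_alt
  by_cases hc : ((PySem.Dict.mk graph).contains start = true)
  · rw [if_pos hc, if_pos hc]
    have hv1 : PySem.Set.add PySem.Set.empty start = [start] := rfl
    rw [pvAvisit, hv1]
    by_cases hsg : start = goal
    · rw [if_pos hsg, if_pos hsg]
    · rw [if_neg hsg, if_neg hsg]
      have hU : (PySem.Set.ofList (start :: graph.flatMap Prod.snd)).Nodup :=
        PySem.Set.nodup_ofList _
      have hval : ∀ x ∈ graph.flatMap Prod.snd, x ∈ PySem.Set.ofList (start :: graph.flatMap Prod.snd) :=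
        fun x hx => (PySem.Set.mem_ofList _ _).2 (by simp [hx])
      have hstart : start ∈ PySem.Set.ofList (start :: graph.flatMap Prod.snd) :=
        (PySem.Set.mem_ofList _ _).2 (by simp)
      have hUlen : 1 ≤ (PySem.Set.ofList (start :: graph.flatMap Prod.snd)).length :=
        List.length_pos_of_mem hstart
      have hmain := pvMain graph goal (PySem.Set.ofList (start :: graph.flatMap Prod.snd))
        ((graph.flatMap Prod.snd).length + 2) hU hval le_rfl
        (((PySem.Set.ofList (start :: graph.flatMap Prod.snd)).length - 1) * ((graph.flatMap Prod.snd).length + 2)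
          + ((PySem.Dict.mk graph).getD start []).length)
        ((PySem.Set.ofList (start :: graph.flatMap Prod.snd)).length)
        start [start] ((PySem.Dict.mk graph).getD start []) [start] []
        (pvFuelB graph start)
        (by simp) (fun x hx => by simp only [List.mem_singleton] at hx; exact hx ▸ hstart)
        (fun x hx => hval x (pvGetD_mem_flat graph start x hx))
        (fun f hf => by simp at hf)
        le_rfl (by simp only [List.length_cons, List.length_nil]; omega) ?_
      · rw [hmain, pvBrun_nil]; simp
      · unfold pvFuelB pvMu pvSumNS
        have hlenD := pvGetD_len_le graph start
        have h1 : ((PySem.Set.ofList (start :: graph.flatMap Prod.snd)).length - 1)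
            * ((graph.flatMap Prod.snd).length + 2)
            ≤ (PySem.Set.ofList (start :: graph.flatMap Prod.snd)).length * ((graph.flatMap Prod.snd).length + 2) :=
          Nat.mul_le_mul_right _ (by omega)
        have h2 : ((PySem.Set.ofList (start :: graph.flatMap Prod.snd)).length + 1)
            * ((graph.flatMap Prod.snd).length + 2)
            = (PySem.Set.ofList (start :: graph.flatMap Prod.snd)).length * ((graph.flatMap Prod.snd).length + 2)
              + ((graph.flatMap Prod.snd).length + 2) := by rw [Nat.succ_mul]
        simp only [List.map_cons, List.map_nil, List.sum_cons, List.sum_nil, List.length_cons, List.length_nil, Nat.zero_add]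
        omega
  · rw [if_neg hc, if_neg hc]
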